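-- pv_equiv track=rewrite | github.com/aliyagubov/kod | Camel case of a given sentence.py | convertToCamelCase
-- ===== SOURCE A (Python) =====
-- def convertToCamelCase(s):
--     res = []
--
--     # Flag to indicate when to capitalize the next letter
--     capitalizeNext = False
--
--     for i in range(len(s)):
--
--         # If we encounter a space, set the flag to capitalize
--         # the next character
--         if s[i] == ' ':
--             capitalizeNext = True
--
--         # If the flag is set, capitalize the current character
--         elif capitalizeNext:
--             res.append(s[i].upper())
--
--             # Reset the flag after capitalization
--             capitalizeNext = False
--
--         # Otherwise, just add the current character to the result
--         else:
--             res.append(s[i])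
--
--     return ''.join(res)
-- ===== SOURCE B (Python) =====
-- def convertToCamelCase(s):
--     # split/transform/join instead of a stateful char-by-char scan
--     words = s.split(' ')
--     return words[0] + ''.join(w[:1].upper() + w[1:] for w in words[1:])
-- ===== Notes on version B (the rewrite author's own statement) =====
-- stated objective: idiomatic
-- what changed: Replaced the stateful character-by-character scan with a capitalizeNext flag by a single-space split/transform/join decomposition: keep the first word, uppercase the first character of every later word, concatenate.
import Mathlib
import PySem

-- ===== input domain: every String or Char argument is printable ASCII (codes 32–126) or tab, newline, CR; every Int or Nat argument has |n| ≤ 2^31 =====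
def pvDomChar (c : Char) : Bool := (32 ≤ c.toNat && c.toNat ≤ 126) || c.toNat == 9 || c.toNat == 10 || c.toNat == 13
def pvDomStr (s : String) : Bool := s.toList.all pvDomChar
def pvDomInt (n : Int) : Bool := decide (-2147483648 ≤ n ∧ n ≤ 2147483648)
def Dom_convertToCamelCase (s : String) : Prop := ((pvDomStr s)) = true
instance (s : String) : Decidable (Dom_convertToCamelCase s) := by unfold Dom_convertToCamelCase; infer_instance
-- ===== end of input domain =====

-- B replaces A's stateful character scan (a capitalizeNext flag) by a split(' ')/transform/join decomposition.

-- ===== PORT A =====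
-- A: loop over the characters, keeping the result list and the capitalizeNext flag.
def convertToCamelCase (s : String) : String :=
  let st := s.toList.foldl
    (fun (st : List Char × Bool) c =>
      if c = ' ' then (st.1, true)
      else if st.2 then (st.1 ++ [PySem.Chars.upperChar c], false)
      else (st.1 ++ [c], false))
    ([], false)
  String.ofList st.1

-- ===== PORT B =====
-- w[:1].upper() + w[1:] : uppercase the first character of a (possibly empty) word
def pvCapWord (w : List Char) : List Char :=
  match w with
  | [] => []
  | c :: cs => PySem.Chars.upperChar c :: cs

def convertToCamelCase_alt (s : String) : String :=
  match PySem.Chars.splitOn s.toList [' '] with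
  | [] => ""   -- unreachable: split(' ') always yields at least one word
  | w :: ws => String.ofList (w ++ (ws.map pvCapWord).flatten)

-- ===== PRECONDITION & SPEC =====
def Spec_convertToCamelCase (s : String) (out : String) : Prop := out = convertToCamelCase_alt s
instance (s : String) (out : String) : Decidable (Spec_convertToCamelCase s out) := by unfold Spec_convertToCamelCase; infer_instance

-- ===== CLAIM (what is proved, stated in full; the proofs are below) =====
def Claim_equal_convertToCamelCase : Prop := ∀ (s : String), Dom_convertToCamelCase s → Spec_convertToCamelCase s (convertToCamelCase s)

-- ===== LEMMAS AND PROOFS =====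

-- A's loop as a structural recursion producing the output front-to-back
def pvGoA : List Char → Bool → List Char
  | [], _ => []
  | c :: cs, f =>
    if c = ' ' then pvGoA cs true
    else if f then PySem.Chars.upperChar c :: pvGoA cs false
    else c :: pvGoA cs false

lemma pvFoldA (cs : List Char) : ∀ (res : List Char) (f : Bool),
    (cs.foldl
      (fun (st : List Char × Bool) c =>
        if c = ' ' then (st.1, true)
        else if st.2 then (st.1 ++ [PySem.Chars.upperChar c], false)
        else (st.1 ++ [c], false))
      (res, f)).1 = res ++ pvGoA cs f := by
  induction cs with
  | nil => intro res f; simp [pvGoA]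
  | cons c cs ih =>
    intro res f
    by_cases hc : c = ' '
    · simp [List.foldl, hc, pvGoA, ih]
    · cases f <;> simp [List.foldl, hc, pvGoA, ih]

-- split on a single space, structurally (proof-side model of splitOn)
def pvSplitAux : List Char → List Char → List (List Char)
  | [], cur => [cur.reverse]
  | c :: cs, cur => if c = ' ' then cur.reverse :: pvSplitAux cs [] else pvSplitAux cs (c :: cur)

lemma pvGo_eq (fuel : Nat) : ∀ (l cur : List Char) (acc : List (List Char)),
    l.length < fuel →
    PySem.Chars.splitOn.go [' '] fuel l cur acc = acc.reverse ++ pvSplitAux l cur := by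
  induction fuel with
  | zero => intro l cur acc h; omega
  | succ fuel ih =>
    intro l cur acc h
    cases l with
    | nil => simp [PySem.Chars.splitOn.go, pvSplitAux]
    | cons c rest =>
      by_cases hc : c = ' '
      · subst hc
        rw [show PySem.Chars.splitOn.go [' '] (fuel+1) (' ' :: rest) cur acc
              = PySem.Chars.splitOn.go [' '] fuel rest [] (cur.reverse :: acc) by
            simp [PySem.Chars.splitOn.go, List.isPrefixOf]]
        rw [ih rest [] (cur.reverse :: acc) (by simpa using Nat.lt_of_succ_lt_succ h)]
        simp [pvSplitAux]
      · rw [show PySem.Chars.splitOn.go [' '] (fuel+1) (c :: rest) cur acc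
              = PySem.Chars.splitOn.go [' '] fuel rest (c :: cur) acc by
            simp [PySem.Chars.splitOn.go, List.isPrefixOf, Ne.symm hc]]
        rw [ih rest (c :: cur) acc (by simpa using Nat.lt_of_succ_lt_succ h)]
        simp [pvSplitAux, hc]

lemma pvSplit_eq (cs : List Char) : PySem.Chars.splitOn cs [' '] = pvSplitAux cs [] := by
  have := pvGo_eq (cs.length + 1) cs [] [] (by omega)
  simpa [PySem.Chars.splitOn] using this

-- shifting the current-word accumulator
lemma pvSplitAux_shift (cs : List Char) : ∀ (cur : List Char),
    pvSplitAux cs cur =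
      match pvSplitAux cs [] with
      | [] => []
      | w :: ws => (cur.reverse ++ w) :: ws := by
  induction cs with
  | nil => intro cur; simp [pvSplitAux]
  | cons c cs ih =>
    intro cur
    by_cases hc : c = ' '
    · simp [pvSplitAux, hc]
    · simp only [pvSplitAux, if_neg hc]
      rw [ih (c :: cur), ih [c]]
      cases pvSplitAux cs [] <;> simp

lemma pvSplitAux_ne_nil (cs : List Char) : ∀ cur, pvSplitAux cs cur ≠ [] := by
  induction cs with
  | nil => intro cur; simp [pvSplitAux]
  | cons c cs ih =>
    intro cur
    by_cases hc : c = ' ' <;> simp [pvSplitAux, hc, ih]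

-- the core correspondence: A's scan vs split/cap/join
lemma pvMain (cs : List Char) :
    (pvGoA cs false =
      (match pvSplitAux cs [] with
       | [] => []
       | w :: ws => w ++ (ws.map pvCapWord).flatten)) ∧
    pvGoA cs true = ((pvSplitAux cs []).map pvCapWord).flatten := by
  induction cs with
  | nil => simp [pvGoA, pvSplitAux, pvCapWord]
  | cons c cs ih =>
    by_cases hc : c = ' '
    · subst hc
      constructor
      · simpa [pvGoA, pvSplitAux] using ih.2
      · simpa [pvGoA, pvSplitAux, pvCapWord] using ih.2
    · have hshape := pvSplitAux_ne_nil cs []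
      simp only [pvGoA, if_neg hc, pvSplitAux]
      rw [pvSplitAux_shift cs [c]]
      cases h : pvSplitAux cs [] with
      | nil => exact absurd h hshape
      | cons w ws =>
        rw [h] at ih
        constructor
        · simp [ih.1]
        · simp [pvCapWord, ih.1]

-- ===== VERDICT (by name: the statement is the Claim_ definition above) =====
theorem convertToCamelCase_spec : Claim_equal_convertToCamelCase := by
  intro s _
  unfold Spec_convertToCamelCase convertToCamelCase convertToCamelCase_alt
  rw [pvSplit_eq]
  have hshape := pvSplitAux_ne_nil s.toList []
  have hm := (pvMain s.toList).1
  cases h : pvSplitAux s.toList [] with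
  | nil => exact absurd h hshape
  | cons w ws =>
    rw [h] at hm
    simp [pvFoldA, hm]
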